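-- pv_equiv track=rewrite | github.com/JoJaJones/Advent-of-Code | aoc2015/Day3/day_solution.py | part_two
-- ===== SOURCE A (Python) =====
-- def calc_pos(x, y, move):
--     if move == ">":
--         x += 1
--     elif move == "^":
--         y += 1
--     elif move == "v":
--         y -= 1
--     elif move == "<":
--         x -= 1
--
--     return x, y
--
-- def part_two(data):
--     visited = set()
--     xs, ys = 0, 0
--     xr, yr = 0, 0
--     visited.add((xs,ys))
--     for i in range(0,len(data), 2):
--         xs, ys = calc_pos(xs, ys, data[i])
--         visited.add((xs, ys))
--         if i + 1 < len(data):
--             xr, yr = calc_pos(xr, yr, data[i+1])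
--             visited.add((xr, yr))
--
--     return len(visited)
-- ===== SOURCE B (Python) =====
-- DELTAS = {">": (1, 0), "<": (-1, 0), "^": (0, 1), "v": (0, -1)}
--
-- def part_two(data):
--     visited = {(0, 0)}
--     for stream in (data[0::2], data[1::2]):
--         x, y = 0, 0
--         for c in stream:
--             dx, dy = DELTAS.get(c, (0, 0))
--             x, y = x + dx, y + dy
--             visited.add((x, y))
--     return len(visited)
-- ===== Notes on version B (the rewrite author's own statement) =====
-- stated objective: alternative
-- what changed: Instead of one index loop over range(0, len, 2) that interleaves both walkers and indexes data[i], data[i+1], B first splits the moves into two independent streams data[0::2] and data[1::2], walks each stream in its own plain for-loop threading one (x,y) position, replaces the if/elif helper by a direction-to-delta dict lookup with (0,0) default, and collects all positions in one shared set.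
import Mathlib
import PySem

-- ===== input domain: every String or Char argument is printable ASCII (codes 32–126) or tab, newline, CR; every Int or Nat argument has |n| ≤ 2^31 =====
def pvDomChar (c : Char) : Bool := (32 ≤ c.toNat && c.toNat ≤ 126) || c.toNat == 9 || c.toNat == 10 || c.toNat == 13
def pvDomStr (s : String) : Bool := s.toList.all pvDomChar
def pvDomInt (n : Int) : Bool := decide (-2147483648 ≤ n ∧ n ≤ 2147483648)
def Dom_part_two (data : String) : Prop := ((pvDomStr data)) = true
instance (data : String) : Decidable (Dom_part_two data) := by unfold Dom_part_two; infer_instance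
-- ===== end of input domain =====

-- B splits the moves into the two Santas' streams (data[0::2], data[1::2]) and walks each in its
-- own loop with a delta-dict, instead of A's single index loop interleaving both walkers;
-- same result, similar cost (objective: alternative decomposition).

-- ===== PORT A =====
def calc_pos (x y : Int) (move : Char) : Int × Int :=
  if move = '>' then (x + 1, y)
  else if move = '^' then (x, y + 1)
  else if move = 'v' then (x, y - 1)
  else if move = '<' then (x - 1, y)
  else (x, y)

-- loop body of A's 'for i in range(0, len(data), 2)' (state = (visited, xs, ys, xr, yr))
def pvBodyA (l : List Char) (st : PySem.Set (Int × Int) × Int × Int × Int × Int) (i : Int) :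
    PySem.Set (Int × Int) × Int × Int × Int × Int :=
  let p := calc_pos st.2.1 st.2.2.1 (PySem.List.pyGetD l i ' ')
  let v := PySem.Set.add st.1 p
  if i + 1 < PySem.Chars.len l then
    let q := calc_pos st.2.2.2.1 st.2.2.2.2 (PySem.List.pyGetD l (i + 1) ' ')
    (PySem.Set.add v q, p.1, p.2, q.1, q.2)
  else (v, p.1, p.2, st.2.2.2.1, st.2.2.2.2)

def part_two (data : String) : Int :=
  let l := data.toList
  let st := (PySem.List.pyRange 0 (PySem.Chars.len l) 2).foldl (pvBodyA l)
    (PySem.Set.add PySem.Set.empty ((0 : Int), (0 : Int)), 0, 0, 0, 0)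
  PySem.Set.len st.1

-- ===== PORT B =====
def pvDeltas : PySem.Dict Char (Int × Int) :=
  PySem.Dict.ofList [('>', (1, 0)), ('<', (-1, 0)), ('^', (0, 1)), ('v', (0, -1))]

-- body of Source B's inner 'for c in stream' loop (state = (visited, x, y))
def pvWalkF (st : PySem.Set (Int × Int) × Int × Int) (c : Char) :
    PySem.Set (Int × Int) × Int × Int :=
  let d := pvDeltas.getD c (0, 0)
  let x := st.2.1 + d.1
  let y := st.2.2 + d.2
  (PySem.Set.add st.1 (x, y), x, y)

def pvWalk (v : PySem.Set (Int × Int)) (stream : String) : PySem.Set (Int × Int) :=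
  (stream.toList.foldl pvWalkF (v, 0, 0)).1

def part_two_alt (data : String) : Int :=
  -- data[0::2] / data[1::2]; step = 2 ≠ 0, so .getD "" only totalizes the slice
  let santa := (PySem.Str.slice? data (some 0) none 2).getD ""
  let robo := (PySem.Str.slice? data (some 1) none 2).getD ""
  let v0 : PySem.Set (Int × Int) := PySem.Set.add PySem.Set.empty ((0 : Int), (0 : Int))
  PySem.Set.len (pvWalk (pvWalk v0 santa) robo)

-- ===== PRECONDITION & SPEC =====
def Spec_part_two (data : String) (out : Int) : Prop := out = part_two_alt data
instance (data : String) (out : Int) : Decidable (Spec_part_two data out) := by unfold Spec_part_two; infer_instance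

-- ===== CLAIM (what is proved, stated in full; the proofs are below) =====
def Claim_equal_part_two : Prop := ∀ (data : String), Dom_part_two data → Spec_part_two data (part_two data)

-- ===== LEMMAS AND PROOFS =====

-- neutral spec-level move function
def pvDelta (c : Char) : Int × Int :=
  if c = '>' then (1, 0)
  else if c = '^' then (0, 1)
  else if c = 'v' then (0, -1)
  else if c = '<' then (-1, 0)
  else (0, 0)

def pvStep (p : Int × Int) (c : Char) : Int × Int := (p.1 + (pvDelta c).1, p.2 + (pvDelta c).2)

-- positions visited along a stream, starting (exclusively) from p
def pvVisit (p : Int × Int) : List Char → List (Int × Int)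
  | [] => []
  | c :: t => pvStep p c :: pvVisit (pvStep p c) t

-- elements at even / odd indices
def pvEvens : List Char → List Char
  | [] => []
  | [a] => [a]
  | a :: _ :: t => a :: pvEvens t

def pvOdds : List Char → List Char
  | [] => []
  | [_] => []
  | _ :: b :: t => b :: pvOdds t

-- two-at-a-time recursion equivalent to A's index loop
def pvAuxA : (PySem.Set (Int × Int) × Int × Int × Int × Int) → List Char →
    (PySem.Set (Int × Int) × Int × Int × Int × Int)
  | st, [] => st
  | (v, xs, ys, xr, yr), [a] =>
      let p := calc_pos xs ys a
      (PySem.Set.add v p, p.1, p.2, xr, yr)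
  | (v, xs, ys, xr, yr), a :: b :: t =>
      let p := calc_pos xs ys a
      let q := calc_pos xr yr b
      pvAuxA (PySem.Set.add (PySem.Set.add v p) q, p.1, p.2, q.1, q.2) t

theorem calc_pos_eq_step (x y : Int) (c : Char) : calc_pos x y c = pvStep (x, y) c := by
  simp only [calc_pos, pvStep, pvDelta]
  split_ifs <;> simp <;> ring

theorem deltas_getD (c : Char) : pvDeltas.getD c (0, 0) = pvDelta c := by
  simp only [pvDeltas, PySem.Dict.ofList, PySem.Dict.update, List.foldl, pvDelta]
  simp [PySem.Dict.getD_insert, PySem.Dict.getD_empty]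
  split_ifs <;> simp_all

theorem walkF_eq (st : PySem.Set (Int × Int) × Int × Int) (c : Char) :
    pvWalkF st c = (PySem.Set.add st.1 (pvStep (st.2.1, st.2.2) c),
      (pvStep (st.2.1, st.2.2) c).1, (pvStep (st.2.1, st.2.2) c).2) := by
  simp [pvWalkF, deltas_getD, pvStep]

-- ---- stream extraction lemmas ----

theorem filterMap_two_evens (l : List Char) :
    (List.range ((l.length + 1) / 2)).filterMap (fun k => l[2 * k]?) = pvEvens l := by
  fun_induction pvEvens l with
  | case1 => simp
  | case2 a => simp [List.range_succ]
  | case3 a b t ih =>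
    have h : (a :: b :: t).length + 1 = (t.length + 1) + 1 * 2 := by simp
    rw [h, Nat.add_mul_div_right _ _ (by omega), List.range_succ_eq_map, List.filterMap_cons,
        List.filterMap_map]
    simp only [Function.comp]
    have h2 : ∀ k : Nat, (a :: b :: t)[2 * Nat.succ k]? = t[2 * k]? := by
      intro k
      have : 2 * Nat.succ k = 2 * k + 1 + 1 := by omega
      simp [this]
    simp only [h2, ih]
    simp

theorem filterMap_two_odds (l : List Char) :
    (List.range (l.length / 2)).filterMap (fun k => l[2 * k + 1]?) = pvOdds l := by
  fun_induction pvOdds l with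
  | case1 => simp
  | case2 a => simp
  | case3 a b t ih =>
    have h : (a :: b :: t).length = t.length + 1 * 2 := by simp
    rw [h, Nat.add_mul_div_right _ _ (by omega), List.range_succ_eq_map, List.filterMap_cons,
        List.filterMap_map]
    simp only [Function.comp]
    have h2 : ∀ k : Nat, (a :: b :: t)[2 * Nat.succ k + 1]? = t[2 * k + 1]? := by
      intro k
      have : 2 * Nat.succ k + 1 = 2 * k + 1 + 1 + 1 := by omega
      simp [this]
    simp only [h2, ih]
    simp

theorem listSlice_evens (l : List Char) :
    PySem.List.slice? l (some 0) none 2 = some (pvEvens l) := by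
  rw [← filterMap_two_evens]
  rw [PySem.List.slice?]
  rw [if_neg (by norm_num : ¬(2:Int) = 0)]
  simp only [PySem.List.sliceIndices]
  norm_num
  have h1 : ∀ x : Nat, ((2 * (x : Int)).toNat) = 2 * x := by intro x; omega
  have h2 : (if 0 < l.length then (((l.length : Int) + 2 - 1) / 2).toNat else 0) = (l.length + 1) / 2 := by
    split_ifs <;> omega
  simp only [h1, h2]

theorem listSlice_odds (l : List Char) :
    PySem.List.slice? l (some 1) none 2 = some (pvOdds l) := by
  rw [← filterMap_two_odds]
  rw [PySem.List.slice?]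
  rw [if_neg (by norm_num : ¬(2:Int) = 0)]
  simp only [PySem.List.sliceIndices]
  norm_num
  have h1 : ∀ x : Nat, ((min 1 (l.length : Int) + 2 * (x : Int)).toNat) = min 1 l.length + 2 * x := by
    intro x; omega
  simp only [h1]
  rcases l with _ | ⟨a, t⟩
  · simp
  · have h3 : ∀ x : Nat, min 1 (a :: t).length + 2 * x = 2 * x + 1 := by
      intro x; simp; omega
    simp only [h3]
    have hn : (a :: t).length = t.length + 1 := rfl
    rw [hn]
    congr 1
    rw [show ((t.length + 1 : Nat) : Int) = (t.length : Int) + 1 by omega]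
    split_ifs <;> (congr 1; omega)

-- ---- A's index loop equals the two-at-a-time recursion ----

theorem pyRange_two (n : Nat) :
    PySem.List.pyRange 0 (n : Int) 2 = (List.range ((n + 1) / 2)).map (fun k => ((2 * k : Nat) : Int)) := by
  rw [PySem.List.pyRange]
  rw [if_neg (by norm_num : ¬(2:Int) = 0)]
  norm_num
  have h2 : (if 0 < n then (((n : Int) + 2 - 1) / 2).toNat else 0) = (n + 1) / 2 := by
    split_ifs <;> omega
  rw [h2]

theorem bodyA_shift (a b : Char) (t : List Char)
    (st : PySem.Set (Int × Int) × Int × Int × Int × Int) (k : Nat) :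
    pvBodyA (a :: b :: t) st ((2 * (k + 1) : Nat) : Int) = pvBodyA t st ((2 * k : Nat) : Int) := by
  have hg : ∀ (x : List Char) (m : Nat), PySem.List.pyGetD (a :: b :: x) ((2 * (m + 1) : Nat) : Int) ' ' = PySem.List.pyGetD x ((2 * m : Nat) : Int) ' ' := by
    intro x m
    rw [PySem.List.pyGetD_natCast, PySem.List.pyGetD_natCast]
    have : 2 * (m + 1) = 2 * m + 1 + 1 := by omega
    simp [this, List.getD]
  have hg2 : PySem.List.pyGetD (a :: b :: t) (((2 * (k + 1) : Nat) : Int) + 1) ' ' = PySem.List.pyGetD t (((2 * k : Nat) : Int) + 1) ' ' := by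
    rw [show ((2 * (k + 1) : Nat) : Int) + 1 = ((2 * (k + 1) + 1 : Nat) : Int) by push_cast; ring,
        show ((2 * k : Nat) : Int) + 1 = ((2 * k + 1 : Nat) : Int) by push_cast; ring,
        PySem.List.pyGetD_natCast, PySem.List.pyGetD_natCast]
    have : 2 * (k + 1) + 1 = 2 * k + 1 + 1 + 1 := by omega
    simp [this, List.getD]
  have hc : (((2 * (k + 1) : Nat) : Int) + 1 < PySem.Chars.len (a :: b :: t)) ↔ (((2 * k : Nat) : Int) + 1 < PySem.Chars.len t) := by
    simp [PySem.Chars.len_eq]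
    omega
  simp only [pvBodyA, hg, hg2]
  by_cases h : ((2 * k : Nat) : Int) + 1 < PySem.Chars.len t
  · rw [if_pos h, if_pos (hc.mpr h)]
  · rw [if_neg h, if_neg (fun hh => h (hc.mp hh))]

theorem foldRangeA (l : List Char) (st : PySem.Set (Int × Int) × Int × Int × Int × Int) :
    (List.range ((l.length + 1) / 2)).foldl (fun st k => pvBodyA l st ((2 * k : Nat) : Int)) st
      = pvAuxA st l := by
  induction l using pvEvens.induct generalizing st with
  | case1 => simp [pvAuxA]
  | case2 a =>
    obtain ⟨v, xs, ys, xr, yr⟩ := st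
    simp [pvBodyA, pvAuxA, PySem.Chars.len_eq, PySem.List.pyGetD]
  | case3 a b t ih =>
    have hm : ((a :: b :: t).length + 1) / 2 = (t.length + 1) / 2 + 1 := by
      simp; omega
    rw [hm, List.range_succ_eq_map, List.foldl_cons, List.foldl_map]
    have hf : (fun st (k : Nat) => pvBodyA (a :: b :: t) st ((2 * (Nat.succ k) : Nat) : Int))
        = fun st (k : Nat) => pvBodyA t st ((2 * k : Nat) : Int) := by
      funext st k
      exact bodyA_shift a b t st k
    rw [hf, ih]
    obtain ⟨v, xs, ys, xr, yr⟩ := st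
    have hg0 : PySem.List.pyGetD (a :: b :: t) ((2 * 0 : Nat) : Int) ' ' = a := by
      norm_num [PySem.List.pyGetD, PySem.List.pyGet?_zero]
    have hg1 : PySem.List.pyGetD (a :: b :: t) (((2 * 0 : Nat) : Int) + 1) ' ' = b := by
      norm_num [PySem.List.pyGetD, PySem.List.pyGet?_ofNat]
    have hcond : (((2 * 0 : Nat) : Int) + 1 < PySem.Chars.len (a :: b :: t)) := by
      simp [PySem.Chars.len_eq]
    have hstep : pvBodyA (a :: b :: t) (v, xs, ys, xr, yr) ((2 * 0 : Nat) : Int)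
        = ((v.add (calc_pos xs ys a)).add (calc_pos xr yr b), (calc_pos xs ys a).1,
            (calc_pos xs ys a).2, (calc_pos xr yr b).1, (calc_pos xr yr b).2) := by
      simp only [pvBodyA, hg0, hg1, if_pos hcond]
    rw [hstep]
    rfl

-- ---- membership and nodup invariants ----

theorem mem_auxA (l : List Char) (v : PySem.Set (Int × Int)) (xs ys xr yr : Int) (p : Int × Int) :
    p ∈ (pvAuxA (v, xs, ys, xr, yr) l).1 ↔
      p ∈ v ∨ p ∈ pvVisit (xs, ys) (pvEvens l) ∨ p ∈ pvVisit (xr, yr) (pvOdds l) := by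
  induction l using pvEvens.induct generalizing v xs ys xr yr with
  | case1 => simp [pvAuxA, pvEvens, pvOdds, pvVisit]
  | case2 a =>
    simp [pvAuxA, pvEvens, pvOdds, pvVisit, PySem.Set.mem_add, calc_pos_eq_step]
  | case3 a b t ih =>
    simp only [pvAuxA, pvEvens, pvOdds, pvVisit, ih, PySem.Set.mem_add, calc_pos_eq_step,
      Prod.mk.eta, List.mem_cons]
    tauto

theorem nodup_auxA (l : List Char) (v : PySem.Set (Int × Int)) (xs ys xr yr : Int)
    (hv : v.Nodup) : (pvAuxA (v, xs, ys, xr, yr) l).1.Nodup := by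
  induction l using pvEvens.induct generalizing v xs ys xr yr with
  | case1 => exact hv
  | case2 a => exact PySem.Set.nodup_add _ _ hv
  | case3 a b t ih => exact ih _ _ _ _ _ (PySem.Set.nodup_add _ _ (PySem.Set.nodup_add _ _ hv))

theorem mem_walkFoldl (cs : List Char) (v : PySem.Set (Int × Int)) (x y : Int) (p : Int × Int) :
    p ∈ (cs.foldl pvWalkF (v, x, y)).1 ↔ p ∈ v ∨ p ∈ pvVisit (x, y) cs := by
  induction cs generalizing v x y with
  | nil => simp [pvVisit]
  | cons c cs ih =>
    rw [List.foldl_cons, walkF_eq]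
    simp only [pvVisit, List.mem_cons]
    rw [ih]
    simp only [PySem.Set.mem_add, Prod.mk.eta]
    tauto

theorem nodup_walkFoldl (cs : List Char) (v : PySem.Set (Int × Int)) (x y : Int)
    (hv : v.Nodup) : (cs.foldl pvWalkF (v, x, y)).1.Nodup := by
  induction cs generalizing v x y with
  | nil => exact hv
  | cons c cs ih =>
    rw [List.foldl_cons, walkF_eq]
    exact ih _ _ _ (PySem.Set.nodup_add _ _ hv)

-- ===== VERDICT (by name: the statement is the Claim_ definition above) =====
theorem part_two_spec : Claim_equal_part_two := by
  intro data _
  unfold Spec_part_two part_two part_two_alt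
  have hs : PySem.Str.slice? data (some 0) none 2 = some (String.ofList (pvEvens data.toList)) := by
    rw [PySem.Str.slice?, PySem.Chars.slice?_eq_listSlice?, listSlice_evens]
    rfl
  have hr : PySem.Str.slice? data (some 1) none 2 = some (String.ofList (pvOdds data.toList)) := by
    rw [PySem.Str.slice?, PySem.Chars.slice?_eq_listSlice?, listSlice_odds]
    rfl
  rw [hs, hr]
  simp only [Option.getD_some, PySem.Chars.len_eq, pyRange_two, List.foldl_map, foldRangeA,
    pvWalk, String.toList_ofList]
  have hv0 : (PySem.Set.add PySem.Set.empty ((0 : Int), (0 : Int))) = [((0 : Int), (0 : Int))] := rfl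
  have nodA : (pvAuxA (PySem.Set.add PySem.Set.empty ((0 : Int), (0 : Int)), 0, 0, 0, 0) data.toList).1.Nodup := by
    apply nodup_auxA
    rw [hv0]
    simp
  have nodB : (((pvOdds data.toList).foldl pvWalkF
      (((pvEvens data.toList).foldl pvWalkF (PySem.Set.add PySem.Set.empty ((0 : Int), (0 : Int)), 0, 0)).1, 0, 0)).1).Nodup := by
    apply nodup_walkFoldl
    apply nodup_walkFoldl
    rw [hv0]
    simp
  have hperm := (List.perm_ext_iff_of_nodup nodA nodB).mpr (by
    intro p
    rw [mem_auxA, mem_walkFoldl, mem_walkFoldl]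
    tauto)
  simp only [PySem.Set.len]
  exact congrArg _ hperm.length_eq
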